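-- pv_equiv track=rewrite | github.com/Rishat-F/secretary | src/business_logic/utils.py | _no_selected_edge_combination
-- ===== SOURCE A (Python) =====
-- MINIMAL_TIMES_STATUSES_LEN = 3
--
-- class ScheduleTimeStatus:
--     NOT_SELECTED = "not_selected"
--     SELECTED = "selected"
--     EDGE = "edge"
--
-- def _no_selected_edge_combination(times_statuses: list[str]) -> bool:
--     assert len(times_statuses) >= MINIMAL_TIMES_STATUSES_LEN
--     for i in range(len(times_statuses) - 1):
--         if (
--             times_statuses[i] == ScheduleTimeStatus.SELECTED
--             and times_statuses[i+1] == ScheduleTimeStatus.EDGE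
--         ):
--             return False
--     return True
-- ===== SOURCE B (Python) =====
-- MINIMAL_TIMES_STATUSES_LEN = 3
--
--
-- class ScheduleTimeStatus:
--     NOT_SELECTED = "not_selected"
--     SELECTED = "selected"
--     EDGE = "edge"
--
--
-- def _no_selected_edge_combination(times_statuses: list[str]) -> bool:
--     assert len(times_statuses) >= MINIMAL_TIMES_STATUSES_LEN
--     # Serialize the list into one NUL-delimited string (NUL cannot occur in a
--     # status string) and let substring search find a SELECTED->EDGE adjacency.
--     serialized = "\x00".join(["", *times_statuses, ""])
--     return "\x00selected\x00edge\x00" not in serialized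
-- ===== Notes on version B (the rewrite author's own statement) =====
-- stated objective: alternative
-- what changed: Replaces the explicit pairwise index loop with serialization of the list into a single NUL-delimited string (NUL cannot occur in the domain's strings) followed by one substring search for the pattern '\x00selected\x00edge\x00'.
import Mathlib
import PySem

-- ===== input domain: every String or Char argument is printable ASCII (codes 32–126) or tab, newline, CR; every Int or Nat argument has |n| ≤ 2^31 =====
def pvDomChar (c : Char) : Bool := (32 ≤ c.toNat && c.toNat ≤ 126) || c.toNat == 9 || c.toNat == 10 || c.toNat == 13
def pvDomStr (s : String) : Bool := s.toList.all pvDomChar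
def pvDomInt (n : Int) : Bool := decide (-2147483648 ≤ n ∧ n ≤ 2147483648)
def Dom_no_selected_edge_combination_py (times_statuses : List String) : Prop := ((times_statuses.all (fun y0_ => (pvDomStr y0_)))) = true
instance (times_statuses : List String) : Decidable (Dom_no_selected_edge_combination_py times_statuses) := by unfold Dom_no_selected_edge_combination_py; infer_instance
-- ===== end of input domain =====

-- B serializes the list into one NUL-delimited string and does a single substring search
-- for "\x00selected\x00edge\x00" instead of A's pairwise index loop (alternative algorithm).

-- ===== PORT A =====
-- the 'for i in range(...)' loop with early 'return False'
def pvGoA (ts : List String) : List Int → Bool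
  | [] => true
  | i :: rest =>
    if PySem.List.pyGetD ts i "" == "selected" && PySem.List.pyGetD ts (i + 1) "" == "edge"
    then false
    else pvGoA ts rest

def no_selected_edge_combination_py (times_statuses : List String) : Bool :=
  pvGoA times_statuses (PySem.List.pyRange 0 (PySem.List.len times_statuses - 1) 1)

-- ===== PORT B =====
def no_selected_edge_combination_py_alt (times_statuses : List String) : Bool :=
  !(PySem.Str.isIn "\x00selected\x00edge\x00"
      (PySem.Str.join "\x00" ("" :: times_statuses ++ [""])))

-- ===== PRECONDITION & SPEC =====
-- A's leading assert raises AssertionError on lists shorter than 3.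
def Pre_no_selected_edge_combination_py (times_statuses : List String) : Prop :=
  3 ≤ times_statuses.length
instance (times_statuses : List String) : Decidable (Pre_no_selected_edge_combination_py times_statuses) := by unfold Pre_no_selected_edge_combination_py; infer_instance

def pvWitness_no_selected_edge_combination_py : List String :=
  (["selected", "not_selected", "edge"])

def Spec_no_selected_edge_combination_py (times_statuses : List String) (out : Bool) : Prop := out = no_selected_edge_combination_py_alt times_statuses
instance (times_statuses : List String) (out : Bool) : Decidable (Spec_no_selected_edge_combination_py times_statuses out) := by unfold Spec_no_selected_edge_combination_py; infer_instance

-- ===== CLAIM (what is proved, stated in full; the proofs are below) =====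
def Claim_equal_no_selected_edge_combination_py : Prop := ∀ (times_statuses : List String), Dom_no_selected_edge_combination_py times_statuses → Pre_no_selected_edge_combination_py times_statuses → Spec_no_selected_edge_combination_py times_statuses (no_selected_edge_combination_py times_statuses)

-- ===== LEMMAS AND PROOFS =====

-- A's early-return loop is an 'all' over the index list
lemma pvGoA_eq_all (ts : List String) (l : List Int) :
    pvGoA ts l = l.all (fun i =>
      !(PySem.List.pyGetD ts i "" == "selected" && PySem.List.pyGetD ts (i + 1) "" == "edge")) := by
  induction l with
  | nil => rfl
  | cons i rest ih =>
    simp only [pvGoA, List.all_cons]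
    split_ifs with h
    · simp [h]
    · simp [ih, h]

-- the indexed adjacent pairs of ts are exactly ts.zip ts.tail (Nat-index form)
lemma pvZipAdj (ts : List String) :
    (List.range (ts.length - 1)).map (fun k => (ts.getD k "", ts.getD (k + 1) ""))
      = ts.zip ts.tail := by
  induction ts with
  | nil => simp
  | cons a tl ih =>
    cases tl with
    | nil => simp
    | cons b r =>
      have hlen : (a :: b :: r).length - 1 = (b :: r).length - 1 + 1 := by simp
      rw [hlen, List.range_succ_eq_map, List.map_cons, List.map_map]
      have h2 : ((fun k => ((a :: b :: r).getD k "", (a :: b :: r).getD (k + 1) "")) ∘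
          (fun k => k + 1)) = (fun k => ((b :: r).getD k "", (b :: r).getD (k + 1) "")) := by
        funext k; simp
      rw [h2, ih]
      simp

lemma pvContainsMap (l : List Int) (f : Int → String × String) (p : String × String) :
    l.all (fun i => !(f i == p)) = !((l.map f).contains p) := by
  induction l with
  | nil => rfl
  | cons i rest ih =>
    simp only [List.map_cons, List.contains_cons, List.all_cons, Bool.not_or]
    rw [ih, Bool.beq_comm]

lemma pvMapPairs (ts : List String) :
    (PySem.List.pyRange 0 (PySem.List.len ts - 1) 1).map
        (fun i => (PySem.List.pyGetD ts i "", PySem.List.pyGetD ts (i + 1) ""))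
      = ts.zip ts.tail := by
  rw [PySem.List.pyRange_one, List.map_map]
  have hn : ((PySem.List.len ts - 1 : Int) - 0).toNat = ts.length - 1 := by
    simp only [PySem.List.len_eq, Int.sub_zero]
    omega
  rw [hn, ← pvZipAdj]
  apply List.map_congr_left
  intro k _
  have h0 : ((0 : Int) + (k : Int)) = ((k : Nat) : Int) := by ring
  have h1 : (((k : Nat) : Int) + 1) = ((k + 1 : Nat) : Int) := by push_cast; ring
  simp only [Function.comp_apply, h0, h1, PySem.List.pyGetD_natCast]

-- A as a Bool over the zipped adjacent pairs
lemma pvA_eq_zip (ts : List String) :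
    no_selected_edge_combination_py ts
      = !((ts.zip ts.tail).contains ("selected", "edge")) := by
  unfold no_selected_edge_combination_py
  have hb : (fun i => !(PySem.List.pyGetD ts i "" == "selected" &&
        PySem.List.pyGetD ts (i + 1) "" == "edge"))
      = (fun i => !((PySem.List.pyGetD ts i "", PySem.List.pyGetD ts (i + 1) "")
          == (("selected" : String), ("edge" : String)))) := by
    funext i; rfl
  rw [pvGoA_eq_all, hb, pvContainsMap, pvMapPairs]

-- serialized tail: pvL ts = join of ts's strings, each followed by a NUL
def pvL (ts : List String) : List Char :=
  PySem.Chars.join ['\x00'] (ts.map String.toList ++ [[]])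

lemma pvL_nil : pvL [] = [] := by
  simp [pvL, PySem.Chars.join_singleton]

lemma pvL_cons (a : String) (r : List String) :
    pvL (a :: r) = a.toList ++ '\x00' :: pvL r := by
  unfold pvL
  rw [List.map_cons, List.cons_append]
  cases h : r.map String.toList ++ [[]] with
  | nil => exact absurd h (by simp)
  | cons x xs =>
    rw [PySem.Chars.join_cons_cons]
    simp

-- prefix through a NUL boundary: both sides NUL-free up to their first NUL
lemma pvPrefixSep (u : List Char) (Y : List Char) :
    ∀ (a : List Char) (Z : List Char), '\x00' ∉ u → '\x00' ∉ a →
    (u ++ '\x00' :: Y <+: a ++ '\x00' :: Z ↔ u = a ∧ Y <+: Z) := by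
  induction u with
  | nil =>
    intro a Z _ ha
    cases a with
    | nil => simp [List.cons_prefix_cons]
    | cons c a' =>
      simp only [List.nil_append, List.cons_append, List.cons_prefix_cons]
      constructor
      · rintro ⟨rfl, -⟩; exact absurd (List.mem_cons_self) ha
      · rintro ⟨h, -⟩; exact absurd h (by simp)
  | cons c u' ih =>
    intro a Z hu ha
    cases a with
    | nil =>
      simp only [List.cons_append, List.nil_append, List.cons_prefix_cons]
      constructor
      · rintro ⟨rfl, -⟩; exact absurd (List.mem_cons_self) hu
      · rintro ⟨h, -⟩; exact absurd h (by simp)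
    | cons d a' =>
      simp only [List.cons_append, List.cons_prefix_cons]
      rw [ih a' Z (fun h => hu (List.mem_cons_of_mem _ h)) (fun h => ha (List.mem_cons_of_mem _ h))]
      constructor
      · rintro ⟨rfl, rfl, h⟩; exact ⟨rfl, h⟩
      · rintro ⟨h, hy⟩
        injection h with h1 h2
        subst h1; subst h2
        exact ⟨rfl, rfl, hy⟩

-- a NUL-headed pattern cannot start inside a NUL-free block
lemma pvSkip (Q : List Char) :
    ∀ (a : List Char) (X : List Char), '\x00' ∉ a →
    ('\x00' :: Q <:+: a ++ X ↔ '\x00' :: Q <:+: X) := by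
  intro a
  induction a with
  | nil => intro X _; simp
  | cons c a' ih =>
    intro X ha
    rw [List.cons_append, List.infix_cons_iff]
    constructor
    · rintro (hp | hi)
      · obtain ⟨rfl, -⟩ := List.cons_prefix_cons.mp hp
        exact absurd (List.mem_cons_self) ha
      · exact (ih X (fun h => ha (List.mem_cons_of_mem _ h))).mp hi
    · intro h
      exact Or.inr ((ih X (fun h => ha (List.mem_cons_of_mem _ h))).mpr h)

-- the search pattern, right-nested
def pvP : List Char := '\x00' :: ("selected".toList ++ '\x00' :: ("edge".toList ++ ['\x00']))

-- the key characterization: the pattern occurs in the serialization iff an adjacent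
-- ("selected","edge") pair occurs in the list
lemma pvKey (ts : List String) (h : ∀ s ∈ ts, '\x00' ∉ s.toList) :
    (pvP <:+: '\x00' :: pvL ts) ↔ ("selected", "edge") ∈ ts.zip ts.tail := by
  induction ts with
  | nil =>
    rw [pvL_nil]
    simp only [List.zip_nil_left, List.not_mem_nil, iff_false]
    intro hinf
    have := hinf.length_le
    simp [pvP] at this
  | cons a r ih =>
    have ha : '\x00' ∉ a.toList := h a (List.mem_cons_self)
    have hr : ∀ s ∈ r, '\x00' ∉ s.toList := fun s hs => h s (List.mem_cons_of_mem _ hs)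
    rw [pvL_cons, List.infix_cons_iff]
    have hskip : (pvP <:+: a.toList ++ '\x00' :: pvL r ↔ pvP <:+: '\x00' :: pvL r) :=
      pvSkip ("selected".toList ++ '\x00' :: ("edge".toList ++ ['\x00']))
        a.toList ('\x00' :: pvL r) ha
    have hsel : '\x00' ∉ "selected".toList := by decide
    have hedge : '\x00' ∉ "edge".toList := by decide
    constructor
    · rintro (hp | hi)
      · -- prefix case: a = "selected" and r starts with "edge"
        unfold pvP at hp
        rw [List.cons_prefix_cons] at hp
        obtain ⟨-, hp⟩ := hp
        rw [pvPrefixSep _ _ _ _ hsel ha] at hp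
        obtain ⟨hsa, hp⟩ := hp
        cases r with
        | nil =>
          rw [pvL_nil] at hp
          have := hp.length_le
          simp at this
        | cons b r' =>
          rw [pvL_cons] at hp
          have hb : '\x00' ∉ b.toList := hr b (List.mem_cons_self)
          have hp' : "edge".toList ++ '\x00' :: [] <+: b.toList ++ '\x00' :: pvL r' := by
            simpa using hp
          rw [pvPrefixSep _ _ _ _ hedge hb] at hp'
          obtain ⟨hbe, -⟩ := hp'
          have h1 : a = "selected" := String.toList_injective hsa.symm
          have h2 : b = "edge" := String.toList_injective hbe.symm
          subst h1; subst h2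
          simp
      · -- occurrence further right
        have hmem' := ih hr |>.mp (hskip.mp hi)
        cases r with
        | nil => simp at hmem'
        | cons b r' => exact List.mem_cons_of_mem _ hmem' 
    · -- backwards
      intro hmem
      cases r with
      | nil => simp at hmem
      | cons b r' =>
        simp only [List.tail_cons, List.zip_cons_cons, List.mem_cons, Prod.mk.injEq] at hmem
        rcases hmem with ⟨rfl, rfl⟩ | hmem
        · left
          unfold pvP
          rw [List.cons_prefix_cons]
          refine ⟨rfl, ?_⟩
          rw [pvPrefixSep _ _ _ _ hsel ha]
          refine ⟨rfl, ?_⟩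
          rw [pvL_cons]
          have hpre : "edge".toList ++ '\x00' :: [] <+: "edge".toList ++ '\x00' :: pvL r' := by
            rw [pvPrefixSep _ _ _ _ hedge hedge]
            exact ⟨rfl, List.nil_prefix⟩
          simp only [List.append_nil] at hpre; exact hpre
        · right
          rw [hskip]
          exact (ih hr).mpr hmem

lemma pvMain (ts : List String) (hd : Dom_no_selected_edge_combination_py ts) :
    no_selected_edge_combination_py ts = no_selected_edge_combination_py_alt ts := by
  have hfree : ∀ s ∈ ts, '\x00' ∉ s.toList := by
    intro s hs hc
    unfold Dom_no_selected_edge_combination_py at hd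
    rw [List.all_eq_true] at hd
    have := hd s hs
    unfold pvDomStr at this
    rw [List.all_eq_true] at this
    have := this _ hc
    simp [pvDomChar] at this
  rw [pvA_eq_zip]
  unfold no_selected_edge_combination_py_alt
  congr 1
  have hm : (("" :: ts ++ [""]).map String.toList)
      = [] :: (ts.map String.toList ++ [[]]) := by simp
  have hpv : '\x00' :: pvL ts
      = PySem.Chars.join "\x00".toList ([] :: (ts.map String.toList ++ [[]])) := by
    unfold pvL
    cases hts : ts.map String.toList ++ [[]] with
    | nil => exact absurd hts (by simp)
    | cons x xs =>
      rw [PySem.Chars.join_cons_cons]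
      simp [show ("\x00" : String).toList = ['\x00'] from rfl]
  have hjoin : (PySem.Str.join "\x00" ("" :: ts ++ [""])).toList
      = '\x00' :: pvL ts := by
    rw [PySem.Str.toList_join, hm, hpv]
  have hA : ((ts.zip ts.tail).contains ("selected", "edge") = true)
      ↔ ("selected", "edge") ∈ ts.zip ts.tail := by
    simp
  have hB : (PySem.Str.isIn "\x00selected\x00edge\x00"
      (PySem.Str.join "\x00" ("" :: ts ++ [""])) = true)
      ↔ ("selected", "edge") ∈ ts.zip ts.tail := by
    rw [PySem.Str.isIn_eq, hjoin]
    rw [show ("\x00selected\x00edge\x00" : String).toList = pvP from rfl]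
    rw [PySem.Chars.isIn_iff_infix]
    exact pvKey ts hfree
  rw [Bool.eq_iff_iff, hA, hB]

-- ===== VERDICT (by name: the statement is the Claim_ definition above) =====
theorem no_selected_edge_combination_py_spec : Claim_equal_no_selected_edge_combination_py := by
  intro ts hd _
  unfold Spec_no_selected_edge_combination_py
  exact pvMain ts hd
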